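-- pv_equiv track=rewrite | github.com/pypi-data/pypi-mirror-399 | packages/connections-tui/connections_tui-0.1.0rc6-py3-none-any.whl/connections_tui/__init__.py | calculate_board_cols
-- ===== SOURCE A (Python) =====
-- from typing import List, Set, Tuple
--
-- def calculate_board_cols(
--     remaining_words: List[str], width: int
-- ) -> Tuple[int, str, int]:
--     """Calculate the best column count, spacing, and tile width for the given terminal width."""
--     if not remaining_words:
--         return 4, " ", 12
--
--     max_word_len = max([len(w) for w in remaining_words], default=0)
--     tile_w = max(12, max_word_len + 4)  # min 12, or word + padding
--
--     if (4 * tile_w + 3) <= width: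
--         return 4, " ", tile_w
--     if (4 * tile_w) <= width:
--         return 4, "", tile_w
--     if (3 * tile_w + 2) <= width:
--         return 3, " ", tile_w
--     if (3 * tile_w) <= width:
--         return 3, "", tile_w
--     if (2 * tile_w + 1) <= width:
--         return 2, " ", tile_w
--     if (2 * tile_w) <= width:
--         return 2, "", tile_w
--     return 1, "", tile_w
-- ===== SOURCE B (Python) =====
-- def calculate_board_cols(remaining_words, width):
--     if not remaining_words:
--         return 4, " ", 12
--     tile_w = max(12, max(map(len, remaining_words)) + 4)
--     cols = min(4, max(1, width // tile_w))
--     spacing = " " if cols > 1 and cols * tile_w + (cols - 1) <= width else ""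
--     return cols, spacing, tile_w
-- ===== Notes on version B (the rewrite author's own statement) =====
-- stated objective: simpler
-- what changed: Replaces the six-branch comparison chain with a closed-form computation: cols is width // tile_w clamped to [1,4], and the spacing flag is one arithmetic test at that cols.
import Mathlib
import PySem

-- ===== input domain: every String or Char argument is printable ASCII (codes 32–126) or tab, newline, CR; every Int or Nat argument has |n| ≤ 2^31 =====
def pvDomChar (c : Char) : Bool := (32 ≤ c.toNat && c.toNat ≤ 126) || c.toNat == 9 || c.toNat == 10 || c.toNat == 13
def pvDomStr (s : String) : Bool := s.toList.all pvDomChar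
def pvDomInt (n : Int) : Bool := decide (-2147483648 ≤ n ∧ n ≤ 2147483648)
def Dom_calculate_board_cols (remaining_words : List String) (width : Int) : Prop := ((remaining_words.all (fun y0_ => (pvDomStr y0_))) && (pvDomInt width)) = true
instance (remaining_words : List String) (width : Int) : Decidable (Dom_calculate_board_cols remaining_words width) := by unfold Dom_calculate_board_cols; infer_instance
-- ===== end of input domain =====

-- B replaces A's six-branch comparison chain with a closed-form computation:
-- cols = width // tile_w clamped to [1,4], spacing decided by one test (objective: simpler).


-- ===== PORT A =====
def calculate_board_cols (remaining_words : List String) (width : Int) : Int × String × Int :=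
  if remaining_words = [] then (4, " ", 12)
  else
    let max_word_len := PySem.List.maxD (remaining_words.map (fun w => PySem.Str.len w)) (fun x => x) 0
    let tile_w := max 12 (max_word_len + 4)
    if 4 * tile_w + 3 ≤ width then (4, " ", tile_w)
    else if 4 * tile_w ≤ width then (4, "", tile_w)
    else if 3 * tile_w + 2 ≤ width then (3, " ", tile_w)
    else if 3 * tile_w ≤ width then (3, "", tile_w)
    else if 2 * tile_w + 1 ≤ width then (2, " ", tile_w)
    else if 2 * tile_w ≤ width then (2, "", tile_w)
    else (1, "", tile_w)

-- ===== PORT B =====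
def calculate_board_cols_alt (remaining_words : List String) (width : Int) : Int × String × Int :=
  if remaining_words = [] then (4, " ", 12)
  else
    let tile_w := max 12 (PySem.List.maxD (remaining_words.map (fun w => PySem.Str.len w)) (fun x => x) 0 + 4)
    let cols := min 4 (max 1 (PySem.Int.floordiv width tile_w))
    let spacing := if cols > 1 ∧ cols * tile_w + (cols - 1) ≤ width then " " else ""
    (cols, spacing, tile_w)

-- ===== PRECONDITION & SPEC =====
def Spec_calculate_board_cols (remaining_words : List String) (width : Int) (out : Int × String × Int) : Prop := out = calculate_board_cols_alt remaining_words width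
instance (remaining_words : List String) (width : Int) (out : Int × String × Int) : Decidable (Spec_calculate_board_cols remaining_words width out) := by unfold Spec_calculate_board_cols; infer_instance

-- ===== CLAIM =====
def Claim_equal_calculate_board_cols : Prop := ∀ (remaining_words : List String) (width : Int), Dom_calculate_board_cols remaining_words width → Spec_calculate_board_cols remaining_words width (calculate_board_cols remaining_words width)

-- ===== LEMMAS AND PROOFS =====

-- ===== VERDICT =====
theorem calculate_board_cols_spec : Claim_equal_calculate_board_cols := by
  intro ws w _
  unfold Spec_calculate_board_cols calculate_board_cols calculate_board_cols_alt
  by_cases h : ws = []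
  · simp [h]
  · simp only [h, if_false]
    set t := max 12 (PySem.List.maxD (ws.map (fun w => PySem.Str.len w)) (fun x => x) 0 + 4) with ht
    have htpos : (0:Int) < t := lt_of_lt_of_le (by norm_num) (le_max_left _ _)
    set q := PySem.Int.floordiv w t with hq
    have h4 : 4 ≤ q ↔ 4 * t ≤ w := PySem.Int.le_floordiv_iff_mul_le htpos
    have h3 : 3 ≤ q ↔ 3 * t ≤ w := PySem.Int.le_floordiv_iff_mul_le htpos
    have h2 : 2 ≤ q ↔ 2 * t ≤ w := PySem.Int.le_floordiv_iff_mul_le htpos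
    have h1 : 1 ≤ q ↔ t ≤ w := by simpa using PySem.Int.le_floordiv_iff_mul_le (q := 1) (a := w) htpos
    have hd : min 4 (max 1 q) = 1 ∨ min 4 (max 1 q) = 2 ∨ min 4 (max 1 q) = 3 ∨ min 4 (max 1 q) = 4 := by omega
    rcases hd with hd | hd | hd | hd <;>
      rw [hd] <;> split_ifs <;> first | rfl | (exfalso; omega)
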